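-- pv_equiv track=rewrite | github.com/DarkPr0digy/MORPH_SEGMENT | Conditional Random Fields/DataInformation.py | get_surface_segments
-- ===== SOURCE A (Python) =====
-- def get_surface_segments(orthographic: str):
--     """
--     Method to extract the segments from the orthographic form of the word
--     :param orthographic: the orthographic form of the word
--     :return: list of all the segments in the word
--     """
--     segments = []
--     tmp = ''
--     label = False
--
--     # Get all segments from orthographic form
--     for char in orthographic:
--         if char == '[':
--             segments.append(tmp)
--             tmp = ''
--             label = True
--         elif char == ']':
--             label = False
--         elif not label:
--             tmp += char
--     return segments
-- ===== SOURCE B (Python) =====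
-- def get_surface_segments(orthographic):
--     # Segments are the chunks flushed at each opening bracket: split once on it
--     # and describe each piece directly instead of running a character automaton.
--     parts = orthographic.split('[')
--     if len(parts) <= 1:
--         return []
--     return [''.join(parts[0].split(']'))] + [
--         ''.join(p.split(']')[1:]) for p in parts[1:-1]
--     ]
-- ===== Notes on version B (the rewrite author's own statement) =====
-- stated objective: faster
-- what changed: Replaces the character-by-character state machine (segments/tmp/label accumulator) by one split on the opening bracket, describing each piece directly: the first piece with closing brackets removed, then for each middle piece everything after its first closing bracket.
import Mathlib
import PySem

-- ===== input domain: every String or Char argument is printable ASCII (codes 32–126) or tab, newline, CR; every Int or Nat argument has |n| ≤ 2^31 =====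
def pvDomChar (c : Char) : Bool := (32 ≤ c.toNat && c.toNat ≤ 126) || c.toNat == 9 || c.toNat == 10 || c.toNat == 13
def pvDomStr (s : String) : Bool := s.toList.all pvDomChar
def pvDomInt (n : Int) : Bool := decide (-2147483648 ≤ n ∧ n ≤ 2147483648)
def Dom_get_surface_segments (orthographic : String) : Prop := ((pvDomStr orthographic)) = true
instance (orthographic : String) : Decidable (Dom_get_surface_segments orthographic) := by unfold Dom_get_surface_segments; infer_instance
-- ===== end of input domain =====

-- B replaces A's character-by-character state machine by one split on the opening
-- bracket and a direct description of each piece (measured faster by a constant factor).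

-- ===== PORT A =====
-- one loop step of A: state (segments, tmp, label)
def pvStepA (st : List (List Char) × List Char × Bool) (c : Char) :
    List (List Char) × List Char × Bool :=
  match st with
  | (segments, tmp, label) =>
    if c = '[' then (segments ++ [tmp], [], true)
    else if c = ']' then (segments, tmp, false)
    else if label = false then (segments, tmp ++ [c], label)
    else (segments, tmp, label)

def get_surface_segments (orthographic : String) : List String :=
  ((orthographic.toList.foldl pvStepA ([], [], false)).1).map String.ofList

-- ===== PORT B =====
def get_surface_segments_alt (orthographic : String) : List String :=
  let parts := (PySem.Str.split? orthographic "[").getD []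
  if parts.length ≤ 1 then []
  else
    PySem.Str.join ""
        ((PySem.Str.split? ((PySem.List.pyGet? parts 0).getD "") "]").getD []) ::
      (PySem.List.slice parts (some 1) (some (-1))).map (fun p =>
        PySem.Str.join ""
          (PySem.List.slice ((PySem.Str.split? p "]").getD []) (some 1) none))

-- ===== PRECONDITION & SPEC =====
def Spec_get_surface_segments (orthographic : String) (out : List String) : Prop := out = get_surface_segments_alt orthographic
instance (orthographic : String) (out : List String) : Decidable (Spec_get_surface_segments orthographic out) := by unfold Spec_get_surface_segments; infer_instance

-- ===== CLAIM (what is proved, stated in full; the proofs are below) =====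
def Claim_equal_get_surface_segments : Prop := ∀ (orthographic : String), Dom_get_surface_segments orthographic → Spec_get_surface_segments orthographic (get_surface_segments orthographic)

-- ===== LEMMAS AND PROOFS =====

-- reference split: Python's s.split(c) for a single-character separator
def splitC (c : Char) : List Char → List (List Char)
  | [] => [[]]
  | x :: xs =>
    if x = c then [] :: splitC c xs
    else
      match splitC c xs with
      | h :: t => (x :: h) :: t
      | [] => [[x]]

lemma splitC_shape (c : Char) (l : List Char) : ∃ h t, splitC c l = h :: t := by
  induction l with
  | nil => exact ⟨[], [], rfl⟩
  | cons x xs ih =>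
    obtain ⟨h, t, hs⟩ := ih
    by_cases hx : x = c
    · exact ⟨[], splitC c xs, by simp [splitC, hx]⟩
    · exact ⟨x :: h, t, by simp [splitC, hx, hs]⟩

lemma go_eq (c : Char) : ∀ (fuel : Nat) (l cur : List Char) (acc : List (List Char)),
    l.length ≤ fuel →
    PySem.Chars.splitOn.go [c] fuel l cur acc =
      acc.reverse ++ (match splitC c l with
                      | [] => [cur.reverse]
                      | h :: t => (cur.reverse ++ h) :: t) := by
  intro fuel
  induction fuel with
  | zero =>
    intro l cur acc hl
    have : l = [] := List.length_eq_zero_iff.mp (Nat.le_zero.mp hl)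
    subst this
    simp [PySem.Chars.splitOn.go, splitC]
  | succ n ih =>
    intro l cur acc hl
    cases l with
    | nil => simp [PySem.Chars.splitOn.go, splitC]
    | cons x rest =>
      by_cases hx : x = c
      · subst hx
        have hpre : List.isPrefixOf [x] (x :: rest) = true := by
          simp [List.isPrefixOf]
        rw [PySem.Chars.splitOn.go]
        simp only [hpre, if_true]
        rw [ih _ _ _ (by simpa using Nat.lt_succ_iff.mp (by simpa using hl))]
        obtain ⟨h, t, hs⟩ := splitC_shape x rest
        simp [splitC, hs]
      · have hpre : List.isPrefixOf [c] (x :: rest) = false := by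
          simp [List.isPrefixOf]
          exact fun h => absurd h.symm hx
        rw [PySem.Chars.splitOn.go]
        simp only [hpre, Bool.false_eq_true, if_false]
        rw [ih _ _ _ (by simpa using Nat.lt_succ_iff.mp (by simpa using hl))]
        obtain ⟨h, t, hs⟩ := splitC_shape c rest
        simp [splitC, hx, hs]

lemma splitOn_singleton (c : Char) (l : List Char) :
    PySem.Chars.splitOn l [c] = splitC c l := by
  unfold PySem.Chars.splitOn
  rw [go_eq c (l.length + 1) l [] [] (by omega)]
  obtain ⟨h, t, hs⟩ := splitC_shape c l
  simp [hs]

lemma join_flatten : ∀ xs : List (List Char), PySem.Chars.join [] xs = xs.flatten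
  | [] => by simp [PySem.Chars.join, List.intercalate]
  | [x] => by simp [PySem.Chars.join, List.intercalate]
  | x :: y :: t => by
    have ih := join_flatten (y :: t)
    simp [PySem.Chars.join, List.intercalate, List.intersperse] at ih ⊢
    simpa using ih

-- the segment contributed by one piece p: chars outside label regions, ']' dropped;
-- label = whether the piece starts inside a label region
def strip (label : Bool) (p : List Char) : List Char :=
  ((splitC ']' p).drop (if label then 1 else 0)).flatten

lemma strip_nil (label : Bool) : strip label [] = [] := by
  cases label <;> simp [strip, splitC]

lemma strip_rsb (label : Bool) (h : List Char) : strip label (']' :: h) = strip false h := by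
  cases label <;> simp [strip, splitC]

lemma strip_false_cons {c : Char} (hc : c ≠ ']') (h : List Char) :
    strip false (c :: h) = c :: strip false h := by
  obtain ⟨h0, t0, hs⟩ := splitC_shape ']' h
  simp [strip, splitC, hc, hs]

lemma strip_true_cons {c : Char} (hc : c ≠ ']') (h : List Char) :
    strip true (c :: h) = strip true h := by
  obtain ⟨h0, t0, hs⟩ := splitC_shape ']' h
  simp [strip, splitC, hc, hs]

-- the segments A's loop will emit from the remaining input, given pending tmp and label
def pvSegs (l : List Char) (tmp : List Char) (label : Bool) : List (List Char) :=
  match splitC '[' l with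
  | [] => []
  | [_] => []
  | p :: rest => (tmp ++ strip label p) :: rest.dropLast.map (strip true)

lemma foldA_eq : ∀ (l : List Char) (segs : List (List Char)) (tmp : List Char) (label : Bool),
    (l.foldl pvStepA (segs, tmp, label)).1 = segs ++ pvSegs l tmp label := by
  intro l
  induction l with
  | nil => intro segs tmp label; simp [pvSegs, splitC]
  | cons x rest ih =>
    intro segs tmp label
    by_cases hx : x = '['
    · subst hx
      obtain ⟨p, t, hs⟩ := splitC_shape '[' rest
      cases t with
      | nil =>
        simp [List.foldl_cons, pvStepA, ih, pvSegs, splitC, hs, strip_nil]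
      | cons q t' =>
        simp [List.foldl_cons, pvStepA, ih, pvSegs, splitC, hs, strip_nil]
    · obtain ⟨h, t, hs⟩ := splitC_shape '[' rest
      by_cases hr : x = ']'
      · subst hr
        cases t with
        | nil => simp [List.foldl_cons, pvStepA, ih, pvSegs, splitC, hx, hs]
        | cons q t' =>
          simp [List.foldl_cons, pvStepA, ih, pvSegs, splitC, hx, hs, strip_rsb]
      · cases label with
        | false =>
          cases t with
          | nil => simp [List.foldl_cons, pvStepA, ih, pvSegs, splitC, hx, hr, hs]
          | cons q t' =>
            simp [List.foldl_cons, pvStepA, ih, pvSegs, splitC, hx, hr, hs,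
              strip_false_cons hr]
        | true =>
          cases t with
          | nil => simp [List.foldl_cons, pvStepA, ih, pvSegs, splitC, hx, hr, hs]
          | cons q t' =>
            simp [List.foldl_cons, pvStepA, ih, pvSegs, splitC, hx, hr, hs,
              strip_true_cons hr]

lemma slice_one_negone {α : Type} (xs : List α) :
    PySem.List.slice xs (some 1) (some (-1)) = (xs.drop 1).dropLast := by
  cases xs with
  | nil => simp [PySem.List.slice, PySem.List.clampIdx]
  | cons x xs' =>
    simp [PySem.List.slice, PySem.List.clampIdx]
    rw [if_neg (by omega : ¬ ((xs'.length : Int) < 0))]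
    simp [List.dropLast_eq_take]

lemma str_splitC (s : String) (c : Char) :
    PySem.Str.split? s (String.ofList [c]) =
      some ((splitC c s.toList).map String.ofList) := by
  have : (String.ofList [c]).toList = [c] := by simp
  simp [PySem.Str.split?, PySem.Chars.split?, this, splitOn_singleton]

lemma join_strip_false (p : List Char) :
    PySem.Str.join "" ((PySem.Str.split? (String.ofList p) "]").getD []) =
      String.ofList (strip false p) := by
  rw [show ("]" : String) = String.ofList [']'] from rfl]
  rw [str_splitC]
  simp [PySem.Str.join, join_flatten, strip]
  congr 1
  simp [Function.comp_def]

lemma join_strip_true (p : List Char) :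
    PySem.Str.join ""
        (PySem.List.slice ((PySem.Str.split? (String.ofList p) "]").getD []) (some 1) none) =
      String.ofList (strip true p) := by
  rw [show ("]" : String) = String.ofList [']'] from rfl]
  rw [str_splitC]
  simp only [Option.getD_some]
  rw [PySem.List.slice_from _ (by norm_num : (0:Int) ≤ 1)]
  simp [PySem.Str.join, join_flatten, strip, ← List.map_drop]
  congr 1
  simp [Function.comp_def]

-- ===== VERDICT (by name: the statement is the Claim_ definition above) =====
theorem get_surface_segments_spec : Claim_equal_get_surface_segments := by
  intro s _
  unfold Spec_get_surface_segments get_surface_segments get_surface_segments_alt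
  have hsplit : PySem.Str.split? s "[" = some ((splitC '[' s.toList).map String.ofList) := by
    rw [show ("[" : String) = String.ofList ['['] from rfl]
    exact str_splitC s '['
  rw [hsplit]
  obtain ⟨p, rest, hs⟩ := splitC_shape '[' s.toList
  rw [foldA_eq]
  simp only [Option.getD_some, List.length_map, hs]
  cases rest with
  | nil =>
    simp [pvSegs, hs]
  | cons q rest' =>
    have hlen : ¬ (p :: q :: rest').length ≤ 1 := by simp
    simp only [hs, List.map_cons, List.length_cons, pvSegs]
    rw [if_neg (by simp)]
    rw [slice_one_negone]
    simp only [List.nil_append, List.map_cons, List.drop_succ_cons, List.drop_zero]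
    congr 1
    · have h0 : (PySem.List.pyGet? (String.ofList p :: String.ofList q :: List.map String.ofList rest') 0) = some (String.ofList p) := by
        simp [PySem.List.pyGet?, PySem.List.pyIdx?]
        rw [if_pos (by omega : (0:Int) ≤ (rest'.length : Int) + 1)]
        simp
      rw [h0]
      simp [join_strip_false]
    · rw [show String.ofList q :: List.map String.ofList rest' = List.map String.ofList (q :: rest') from rfl]
      rw [← List.map_dropLast, List.map_map, List.map_map]
      refine List.map_congr_left ?_
      intro a _
      simp [join_strip_true]
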